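-- pv_equiv track=rewrite | github.com/zubair480/amadeus_hackathon2 | src/SmartParser/parser/PreParser.py | identify_unparsable_regions
-- ===== SOURCE A (Python) =====
-- def identify_unparsable_regions(preparsed_lines)->list:
--     res = []
--
--     buf = []
--     for i in range(len(preparsed_lines)):
--         if preparsed_lines[i] == None:
--             if len(buf) == 0:
--                 buf += [i]
--             else:
--                 if buf[-1] == i-1:
--                     buf += [i]
--                 else:
--                     res += [buf]
--                     buf = [i]
--     if len(buf) > 0:
--         res += [buf]
--
--     return res
-- ===== SOURCE B (Python) =====
-- def identify_unparsable_regions(preparsed_lines) -> list: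
--     # Boundary detection: a run starts where a None block begins (previous entry
--     # not None) and ends where it stops (next entry not None); pair the matching
--     # boundaries up and emit each run as a range.
--     mask = [x == None for x in preparsed_lines]
--     starts = [i for i, (cur, prev) in enumerate(zip(mask, [False] + mask)) if cur and not prev]
--     ends = [i for i, (cur, nxt) in enumerate(zip(mask, mask[1:] + [False])) if cur and not nxt]
--     return [list(range(s, e + 1)) for s, e in zip(starts, ends)]
-- ===== Notes on version B (the rewrite author's own statement) =====
-- stated objective: alternative
-- what changed: Replaced A's stateful accumulate-and-flush buffer scan by boundary detection: compute run starts (None whose predecessor is not None) and run ends (None whose successor is not None) by zipping the None-mask with its shifted copies, pair them with zip, and materialize each run directly with range(s, e+1).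
import Mathlib
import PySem

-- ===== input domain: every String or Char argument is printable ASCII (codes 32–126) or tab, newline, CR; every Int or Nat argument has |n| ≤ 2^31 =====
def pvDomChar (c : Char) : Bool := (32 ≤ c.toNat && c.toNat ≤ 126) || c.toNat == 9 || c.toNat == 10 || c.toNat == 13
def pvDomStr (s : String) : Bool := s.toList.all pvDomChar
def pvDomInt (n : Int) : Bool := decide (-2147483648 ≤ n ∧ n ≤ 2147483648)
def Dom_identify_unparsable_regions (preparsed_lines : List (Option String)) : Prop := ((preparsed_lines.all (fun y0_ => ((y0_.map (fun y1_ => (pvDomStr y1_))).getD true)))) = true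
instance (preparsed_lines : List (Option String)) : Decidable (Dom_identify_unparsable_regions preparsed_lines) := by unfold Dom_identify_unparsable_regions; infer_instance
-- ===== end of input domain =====

-- B replaces A's stateful accumulate-and-flush buffer scan by boundary detection:
-- run starts/ends are found by zipping the None-mask with shifted copies of itself,
-- matched up by zip, and each run is materialized directly as a range. Objective: alternative.

-- ===== PORT A =====
-- the body of the 'preparsed_lines[i] == None' branch of A's loop
def pvABody (st : List (List Int) × List Int) (i : Int) : List (List Int) × List Int :=
  if st.2.length = 0 then (st.1, st.2 ++ [i])
  else if PySem.List.pyGetD st.2 (-1) 0 = i - 1 then (st.1, st.2 ++ [i])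
  else (st.1 ++ [st.2], [i])

-- the trailing 'if len(buf) > 0: res += [buf]' flush
def pvFlush (st : List (List Int) × List Int) : List (List Int) :=
  if st.2.length > 0 then st.1 ++ [st.2] else st.1

def identify_unparsable_regions (preparsed_lines : List (Option String)) : List (List Int) :=
  pvFlush ((PySem.List.pyRange 0 preparsed_lines.length 1).foldl
    (fun st i =>
      if PySem.List.pyGetD preparsed_lines i none = none then pvABody st i else st)
    ([], []))

-- ===== PORT B =====
def identify_unparsable_regions_alt (preparsed_lines : List (Option String)) : List (List Int) :=
  let mask := preparsed_lines.map (fun x => x == none)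
  let starts := ((PySem.List.enumerate (mask.zip (false :: mask)) 0).filter
      (fun p => p.2.1 && !p.2.2)).map (·.1)
  let ends := ((PySem.List.enumerate (mask.zip (PySem.List.slice mask (some 1) none ++ [false])) 0).filter
      (fun p => p.2.1 && !p.2.2)).map (·.1)
  (starts.zip ends).map (fun p => PySem.List.pyRange p.1 (p.2 + 1) 1)

-- ===== PRECONDITION & SPEC =====
def Spec_identify_unparsable_regions (preparsed_lines : List (Option String)) (out : List (List Int)) : Prop := out = identify_unparsable_regions_alt preparsed_lines
instance (preparsed_lines : List (Option String)) (out : List (List Int)) : Decidable (Spec_identify_unparsable_regions preparsed_lines out) := by unfold Spec_identify_unparsable_regions; infer_instance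

-- ===== CLAIM (what is proved, stated in full; the proofs are below) =====
def Claim_equal_identify_unparsable_regions : Prop := ∀ (preparsed_lines : List (Option String)), Dom_identify_unparsable_regions preparsed_lines → Spec_identify_unparsable_regions preparsed_lines (identify_unparsable_regions preparsed_lines)

-- ===== LEMMAS AND PROOFS =====

-- reference recursion: the runs of consecutive 'true' indices of a mask, offset k
mutual
def pvRin : List Bool → Int → Int → List (List Int)
  | [], k, s => [PySem.List.pyRange s k 1]
  | true :: t, k, s => pvRin t (k + 1) s
  | false :: t, k, s => PySem.List.pyRange s k 1 :: pvRout t (k + 1)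
def pvRout : List Bool → Int → List (List Int)
  | [], _ => []
  | true :: t, k => pvRin t (k + 1) k
  | false :: t, k => pvRout t (k + 1)
end

-- recursive forms of B's start/end boundary tables
def pvS : List Bool → Bool → Int → List Int
  | [], _, _ => []
  | b :: t, prev, k => (if b && !prev then [k] else []) ++ pvS t b (k + 1)

def pvE : List Bool → Int → List Int
  | [], _ => []
  | b :: t, k => (if b && !(t.head?.getD false) then [k] else []) ++ pvE t (k + 1)

-- B's starts table is pvS
lemma pvS_eq (m : List Bool) : ∀ (prev : Bool) (k : Int),
    (((PySem.List.enumerate (m.zip (prev :: m)) k).filter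
      (fun p => p.2.1 && !p.2.2)).map (·.1)) = pvS m prev k := by
  induction m with
  | nil => intro prev k; simp [pvS, PySem.List.enumerate_nil]
  | cons b t ih =>
    intro prev k
    have hz : (b :: t).zip (prev :: b :: t) = (b, prev) :: t.zip (b :: t) := by
      simp [List.zip]
    rw [hz, PySem.List.enumerate_cons]
    cases b <;> cases prev <;> simp [pvS, ih _ (k + 1)]

-- B's ends table is pvE
lemma pvE_eq (m : List Bool) : ∀ (k : Int),
    (((PySem.List.enumerate (m.zip (m.tail ++ [false])) k).filter
      (fun p => p.2.1 && !p.2.2)).map (·.1)) = pvE m k := by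
  induction m with
  | nil => intro k; simp [pvE, PySem.List.enumerate_nil]
  | cons b t ih =>
    intro k
    have hz : (b :: t).zip ((b :: t).tail ++ [false])
        = (b, t.head?.getD false) :: t.zip (t.tail ++ [false]) := by
      cases t <;> simp [List.zip]
    rw [hz, PySem.List.enumerate_cons]
    cases b <;> cases hh : t.head?.getD false <;> simp [pvE, hh, ih (k + 1)]

-- zipping the boundary tables and emitting ranges yields the reference runs
lemma pv_zip_runs (m : List Bool) :
    (∀ k : Int, ((pvS m false k).zip (pvE m k)).map
        (fun p => PySem.List.pyRange p.1 (p.2 + 1) 1) = pvRout m k)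
    ∧ (∀ (k s : Int), (((s :: pvS m true k)).zip (pvE (true :: m) (k - 1))).map
        (fun p => PySem.List.pyRange p.1 (p.2 + 1) 1) = pvRin m k s) := by
  induction m with
  | nil =>
    constructor
    · intro k; simp [pvS, pvE, pvRout]
    · intro k s
      have : k - 1 + 1 = k := by ring
      simp [pvS, pvE, pvRin, this]
  | cons b t ih =>
    obtain ⟨ihOut, ihIn⟩ := ih
    constructor
    · intro k
      cases b with
      | false =>
        show ((pvS (false :: t) false k).zip (pvE (false :: t) k)).map _ = pvRout (false :: t) k
        simp only [pvS, pvE, pvRout]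
        simpa using ihOut (k + 1)
      | true =>
        show ((pvS (true :: t) false k).zip (pvE (true :: t) k)).map _ = pvRout (true :: t) k
        have hs : pvS (true :: t) false k = k :: pvS t true (k + 1) := by simp [pvS]
        rw [hs]
        have he : pvE (true :: t) k = pvE (true :: t) ((k + 1) - 1) := by norm_num
        rw [he, ihIn (k + 1) k]
        simp [pvRout]
    · intro k s
      cases b with
      | false =>
        have hs : pvS (false :: t) true k = pvS t false (k + 1) := by simp [pvS]
        have he : pvE (true :: false :: t) (k - 1) = (k - 1) :: pvE (false :: t) k := by
          simp [pvE]
        have he2 : pvE (false :: t) k = pvE t (k + 1) := by simp [pvE]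
        rw [hs, he, he2]
        simp only [List.zip_cons_cons, List.map_cons]
        rw [ihOut (k + 1)]
        have hk : k - 1 + 1 = k := by ring
        simp [pvRin, hk]
      | true =>
        have hs : pvS (true :: t) true k = pvS t true (k + 1) := by simp [pvS]
        have he : pvE (true :: true :: t) (k - 1) = pvE (true :: t) k := by
          simp [pvE]
        rw [hs, he]
        have he2 : pvE (true :: t) k = pvE (true :: t) ((k + 1) - 1) := by norm_num
        rw [he2, ihIn (k + 1) s]
        simp [pvRin]

-- A's loop step, after rewriting the index loop as a fold over the enumerated mask
def pvAStep (st : List (List Int) × List Int) (p : Int × Bool) : List (List Int) × List Int :=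
  if p.2 then pvABody st p.1 else st

lemma pv_range_last {s k : Int} (h : s < k) :
    PySem.List.pyGetD (PySem.List.pyRange s k 1) (-1) 0 = k - 1 := by
  have : PySem.List.pyRange s k 1 = PySem.List.pyRange s (k - 1) 1 ++ [k - 1] := by
    have := PySem.List.pyRange_one_succ_right (a := s) (b := k - 1) (by omega)
    simpa using this
  rw [this, PySem.List.pyGetD_neg_one_append_singleton]

-- the three state invariants of A's fold
lemma pv_A_states (m : List Bool) :
    (∀ (k : Int) (res : List (List Int)),
      pvFlush ((PySem.List.enumerate m k).foldl pvAStep (res, [])) = res ++ pvRout m k)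
    ∧ (∀ (k s : Int) (res : List (List Int)), s < k →
      pvFlush ((PySem.List.enumerate m k).foldl pvAStep (res, PySem.List.pyRange s k 1))
        = res ++ pvRin m k s)
    ∧ (∀ (k s e : Int) (res : List (List Int)), s ≤ e → e + 2 ≤ k →
      pvFlush ((PySem.List.enumerate m k).foldl pvAStep (res, PySem.List.pyRange s (e + 1) 1))
        = res ++ PySem.List.pyRange s (e + 1) 1 :: pvRout m k) := by
  induction m with
  | nil =>
    refine ⟨?_, ?_, ?_⟩
    · intro k res; simp [PySem.List.enumerate_nil, pvFlush, pvRout]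
    · intro k s res h
      simp [PySem.List.enumerate_nil, pvFlush, pvRin]
      omega
    · intro k s e res h1 h2
      simp [PySem.List.enumerate_nil, pvFlush, pvRout]
      omega
  | cons b t ih =>
    obtain ⟨ihOut, ihIn, ihStale⟩ := ih
    refine ⟨?_, ?_, ?_⟩
    · intro k res
      rw [PySem.List.enumerate_cons]
      cases b with
      | false => simpa [pvAStep, pvRout] using ihOut (k + 1) res
      | true =>
        have hstep : pvAStep (res, []) (k, true) = (res, PySem.List.pyRange k (k + 1) 1) := by
          simp [pvAStep, pvABody, PySem.List.pyRange_one_singleton]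
        simp only [List.foldl_cons, hstep]
        simpa [pvRout] using ihIn (k + 1) k res (by omega)
    · intro k s res h
      rw [PySem.List.enumerate_cons]
      cases b with
      | false =>
        have hstep : pvAStep (res, PySem.List.pyRange s k 1) (k, false)
            = (res, PySem.List.pyRange s k 1) := by simp [pvAStep]
        simp only [List.foldl_cons, hstep]
        have hr : PySem.List.pyRange s k 1 = PySem.List.pyRange s ((k - 1) + 1) 1 := by norm_num
        rw [hr, ihStale (k + 1) s (k - 1) res (by omega) (by omega)]
        have hback : PySem.List.pyRange s ((k - 1) + 1) 1 = PySem.List.pyRange s k 1 := by norm_num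
        rw [hback]
        simp [pvRin]
      | true =>
        have hstep : pvAStep (res, PySem.List.pyRange s k 1) (k, true)
            = (res, PySem.List.pyRange s (k + 1) 1) := by
          simp [pvAStep, pvABody, pv_range_last h,
            PySem.List.pyRange_one_succ_right (a := s) (b := k) (by omega)]
        simp only [List.foldl_cons, hstep]
        simpa [pvRin] using ihIn (k + 1) s res (by omega)
    · intro k s e res h1 h2
      rw [PySem.List.enumerate_cons]
      cases b with
      | false =>
        have hstep : pvAStep (res, PySem.List.pyRange s (e + 1) 1) (k, false)
            = (res, PySem.List.pyRange s (e + 1) 1) := by simp [pvAStep]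
        simp only [List.foldl_cons, hstep]
        simpa [pvRout] using ihStale (k + 1) s e res h1 (by omega)
      | true =>
        have hstep : pvAStep (res, PySem.List.pyRange s (e + 1) 1) (k, true)
            = (res ++ [PySem.List.pyRange s (e + 1) 1], PySem.List.pyRange k (k + 1) 1) := by
          simp [pvAStep, pvABody, pv_range_last (show s < e + 1 by omega),
            PySem.List.pyRange_one_singleton]
          all_goals split_ifs <;> first | rfl | omega
        simp only [List.foldl_cons, hstep]
        rw [ihIn (k + 1) k (res ++ [PySem.List.pyRange s (e + 1) 1]) (by omega)]
        simp [pvRout]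

-- enumerate commutes with map on the values
lemma pv_enum_map {α β : Type} (f : α → β) (xs : List α) : ∀ (k : Int),
    PySem.List.enumerate (xs.map f) k = (PySem.List.enumerate xs k).map (fun p => (p.1, f p.2)) := by
  induction xs with
  | nil => intro k; simp [PySem.List.enumerate_nil]
  | cons x t ih => intro k; simp [PySem.List.enumerate_cons, ih (k + 1)]

-- A's index loop, rewritten as a fold over the enumerated mask
lemma pv_A_as_mask (xs : List (Option String)) :
    identify_unparsable_regions xs =
      pvFlush ((PySem.List.enumerate (xs.map (fun x => x == none)) 0).foldl pvAStep ([], [])) := by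
  unfold identify_unparsable_regions
  congr 1
  rw [pv_enum_map, PySem.List.enumerate_eq_map_pyRange (xs := xs) (d := (none : Option String))]
  rw [List.foldl_map, List.foldl_map]
  apply PySem.List.foldl_congr_mem
  intro st p hp
  by_cases h : PySem.List.pyGetD xs p none = none <;> simp [pvAStep, h]

-- ===== VERDICT (by name: the statement is the Claim_ definition above) =====
theorem identify_unparsable_regions_spec : Claim_equal_identify_unparsable_regions := by
  intro xs _
  show identify_unparsable_regions xs = identify_unparsable_regions_alt xs
  rw [pv_A_as_mask]
  rw [(pv_A_states (xs.map (fun x => x == none))).1 0 []]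
  simp only [identify_unparsable_regions_alt, PySem.List.slice_from_one,
    pvS_eq, pvE_eq, (pv_zip_runs (xs.map (fun x => x == none))).1]
  simp
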